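-- pv_equiv track=rewrite | github.com/MurderWizard/pokemon-arbitrage-webhook | database_scaling_strategy.py | _determine_era
-- ===== SOURCE A (Python) =====
-- def _determine_era(set_name: str) -> str:
--     """Determine era from set name"""
--     set_lower = set_name.lower()
--
--     if any(x in set_lower for x in ['scarlet', 'violet', 'paldea', 'temporal']):
--         return 'Scarlet & Violet (2023+)'
--     elif any(x in set_lower for x in ['sword', 'shield', 'rebel', 'darkness', 'vivid', 'evolving']):
--         return 'Sword & Shield (2020-2022)'
--     elif any(x in set_lower for x in ['sun', 'moon', 'guardians', 'burning', 'ultra', 'forbidden']):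
--         return 'Sun & Moon (2017-2019)'
--     elif any(x in set_lower for x in ['xy', 'flashfire', 'phantom', 'primal', 'roaring', 'ancient']):
--         return 'XY (2014-2016)'
--     elif any(x in set_lower for x in ['black', 'white', 'emerging', 'noble', 'next', 'dark']):
--         return 'Black & White (2011-2013)'
--     elif any(x in set_lower for x in ['diamond', 'pearl', 'platinum', 'heartgold', 'soulsilver']):
--         return 'Diamond & Pearl (2007-2011)'
--     elif any(x in set_lower for x in ['ruby', 'sapphire', 'emerald', 'firered', 'leafgreen']):
--         return 'EX Era (2003-2007)'
--     elif any(x in set_lower for x in ['neo', 'genesis', 'discovery', 'revelation', 'destiny']):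
--         return 'Neo Era (2000-2001)'
--     elif any(x in set_lower for x in ['base', 'jungle', 'fossil', 'rocket', 'gym']):
--         return 'Classic (1998-2003)'
--     else:
--         return 'Other/Modern'
-- ===== SOURCE B (Python) =====
-- _ERA_GROUPS = [
--     (['scarlet', 'violet', 'paldea', 'temporal'], 'Scarlet & Violet (2023+)'),
--     (['sword', 'shield', 'rebel', 'darkness', 'vivid', 'evolving'], 'Sword & Shield (2020-2022)'),
--     (['sun', 'moon', 'guardians', 'burning', 'ultra', 'forbidden'], 'Sun & Moon (2017-2019)'),
--     (['xy', 'flashfire', 'phantom', 'primal', 'roaring', 'ancient'], 'XY (2014-2016)'),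
--     (['black', 'white', 'emerging', 'noble', 'next', 'dark'], 'Black & White (2011-2013)'),
--     (['diamond', 'pearl', 'platinum', 'heartgold', 'soulsilver'], 'Diamond & Pearl (2007-2011)'),
--     (['ruby', 'sapphire', 'emerald', 'firered', 'leafgreen'], 'EX Era (2003-2007)'),
--     (['neo', 'genesis', 'discovery', 'revelation', 'destiny'], 'Neo Era (2000-2001)'),
--     (['base', 'jungle', 'fossil', 'rocket', 'gym'], 'Classic (1998-2003)'),
-- ]
-- _LABELS = [label for _, label in _ERA_GROUPS]
-- # flat keyword -> priority index (keys are unique across groups)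
-- _PRIORITY = {kw: i for i, (kws, _) in enumerate(_ERA_GROUPS) for kw in kws}
--
-- def _determine_era(set_name: str) -> str:
--     s = set_name.lower()
--     best = min((i for kw, i in _PRIORITY.items() if kw in s), default=None)
--     return 'Other/Modern' if best is None else _LABELS[best]
-- ===== Notes on version B (the rewrite author's own statement) =====
-- stated objective: alternative
-- what changed: Instead of a nine-branch first-match if/elif cascade over keyword groups, B builds a flat keyword->priority-index map once, collects the priority of every keyword occurring in the lowered name, and returns the label of the minimum priority (default 'Other/Modern').
import Mathlib
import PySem

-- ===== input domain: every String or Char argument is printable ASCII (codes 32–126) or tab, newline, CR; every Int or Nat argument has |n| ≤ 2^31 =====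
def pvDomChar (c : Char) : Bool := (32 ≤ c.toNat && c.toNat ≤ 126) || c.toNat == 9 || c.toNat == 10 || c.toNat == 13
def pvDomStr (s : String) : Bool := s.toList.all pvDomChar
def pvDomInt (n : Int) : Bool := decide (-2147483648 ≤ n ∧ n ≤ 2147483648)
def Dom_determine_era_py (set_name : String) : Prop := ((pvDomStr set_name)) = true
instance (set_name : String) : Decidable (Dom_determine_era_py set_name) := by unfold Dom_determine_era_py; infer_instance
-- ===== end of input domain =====

-- B replaces A's first-match if/elif cascade by a flat keyword -> priority-index map,
-- taking the MINIMUM priority among all keywords found in the lowered name (objective: alternative).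

-- ===== PORT A =====
-- set_lower is inlined (Python computes it once; the value is identical at every use)
def determine_era_py (set_name : String) : String :=
  if (["scarlet", "violet", "paldea", "temporal"].any (fun x => PySem.Str.isIn x (PySem.Str.lower set_name))) then
    "Scarlet & Violet (2023+)"
  else if (["sword", "shield", "rebel", "darkness", "vivid", "evolving"].any (fun x => PySem.Str.isIn x (PySem.Str.lower set_name))) then
    "Sword & Shield (2020-2022)"
  else if (["sun", "moon", "guardians", "burning", "ultra", "forbidden"].any (fun x => PySem.Str.isIn x (PySem.Str.lower set_name))) then
    "Sun & Moon (2017-2019)"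
  else if (["xy", "flashfire", "phantom", "primal", "roaring", "ancient"].any (fun x => PySem.Str.isIn x (PySem.Str.lower set_name))) then
    "XY (2014-2016)"
  else if (["black", "white", "emerging", "noble", "next", "dark"].any (fun x => PySem.Str.isIn x (PySem.Str.lower set_name))) then
    "Black & White (2011-2013)"
  else if (["diamond", "pearl", "platinum", "heartgold", "soulsilver"].any (fun x => PySem.Str.isIn x (PySem.Str.lower set_name))) then
    "Diamond & Pearl (2007-2011)"
  else if (["ruby", "sapphire", "emerald", "firered", "leafgreen"].any (fun x => PySem.Str.isIn x (PySem.Str.lower set_name))) then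
    "EX Era (2003-2007)"
  else if (["neo", "genesis", "discovery", "revelation", "destiny"].any (fun x => PySem.Str.isIn x (PySem.Str.lower set_name))) then
    "Neo Era (2000-2001)"
  else if (["base", "jungle", "fossil", "rocket", "gym"].any (fun x => PySem.Str.isIn x (PySem.Str.lower set_name))) then
    "Classic (1998-2003)"
  else
    "Other/Modern"

-- ===== PORT B =====
def pvEraGroups : List (List String × String) :=
  [(["scarlet", "violet", "paldea", "temporal"], "Scarlet & Violet (2023+)"),
   (["sword", "shield", "rebel", "darkness", "vivid", "evolving"], "Sword & Shield (2020-2022)"),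
   (["sun", "moon", "guardians", "burning", "ultra", "forbidden"], "Sun & Moon (2017-2019)"),
   (["xy", "flashfire", "phantom", "primal", "roaring", "ancient"], "XY (2014-2016)"),
   (["black", "white", "emerging", "noble", "next", "dark"], "Black & White (2011-2013)"),
   (["diamond", "pearl", "platinum", "heartgold", "soulsilver"], "Diamond & Pearl (2007-2011)"),
   (["ruby", "sapphire", "emerald", "firered", "leafgreen"], "EX Era (2003-2007)"),
   (["neo", "genesis", "discovery", "revelation", "destiny"], "Neo Era (2000-2001)"),
   (["base", "jungle", "fossil", "rocket", "gym"], "Classic (1998-2003)")]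

-- _LABELS = [label for _, label in _ERA_GROUPS]
def pvLabels : List String := pvEraGroups.map Prod.snd

-- _PRIORITY = {kw: i for i, (kws, _) in enumerate(_ERA_GROUPS) for kw in kws}; keywords are
-- unique across groups, so the dict's items in insertion order are exactly this flat list.
def pvPriority : List (String × Int) :=
  (PySem.List.enumerate pvEraGroups 0).flatMap (fun g => g.2.1.map (fun kw => (kw, g.1)))

-- s and best are inlined (each is used once)
def determine_era_py_alt (set_name : String) : String :=
  match PySem.List.min?
      ((pvPriority.filter (fun q => PySem.Str.isIn q.1 (PySem.Str.lower set_name))).map Prod.snd)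
      (fun i => i) with
  | none => "Other/Modern"
  | some i => (PySem.List.pyGet? pvLabels i).getD ""   -- i is always a valid index, getD never fires

-- ===== PRECONDITION & SPEC =====
def Spec_determine_era_py (set_name : String) (out : String) : Prop := out = determine_era_py_alt set_name
instance (set_name : String) (out : String) : Decidable (Spec_determine_era_py set_name out) := by unfold Spec_determine_era_py; infer_instance

-- ===== CLAIM (what is proved, stated in full; the proofs are below) =====
def Claim_equal_determine_era_py : Prop := ∀ (set_name : String), Dom_determine_era_py set_name → Spec_determine_era_py set_name (determine_era_py set_name)

-- ===== LEMMAS AND PROOFS =====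

-- hits of the tail starting at offset n: one constant block per group
def pvF (p : String → Bool) : List (List String) → Int → List Int
  | [], _ => []
  | g :: t, n => ((g.filter p).map (fun _ => n)) ++ pvF p t (n + 1)

-- index of the first matching group, offset n
def pvFirst (p : String → Bool) : List (List String) → Int → Option Int
  | [], _ => none
  | g :: t, n => if g.any p then some n else pvFirst p t (n + 1)

lemma pvF_lower_bound (p : String → Bool) (gs : List (List String)) (n : Int) :
    ∀ y ∈ pvF p gs n, n ≤ y := by
  induction gs generalizing n with
  | nil => simp [pvF]
  | cons g t ih =>
    intro y hy
    simp only [pvF, List.mem_append, List.mem_map] at hy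
    rcases hy with ⟨_, _, rfl⟩ | hy
    · exact le_refl n
    · have := ih (n + 1) y hy; omega

lemma pv_min_split (k : Int) (l1 l2 : List Int) (h1 : l1 ≠ [])
    (hc : ∀ x ∈ l1, x = k) (h2 : ∀ y ∈ l2, k ≤ y) :
    PySem.List.min? (l1 ++ l2) (fun i => i) = some k := by
  cases hmin : PySem.List.min? (l1 ++ l2) (fun i => i) with
  | none =>
    rw [PySem.List.min?_eq_none_iff] at hmin
    rcases l1 with _ | ⟨a, t⟩
    · exact absurd rfl h1
    · simp at hmin
  | some m =>
    have hmem := PySem.List.min?_mem hmin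
    have hmn := PySem.List.min?_isMin hmin
    have hkmem : k ∈ l1 ++ l2 := by
      rcases l1 with _ | ⟨a, t⟩
      · exact absurd rfl h1
      · have : a = k := hc a (by simp)
        simp [← this]
    have hmk : m ≤ k := hmn k hkmem
    rw [List.mem_append] at hmem
    rcases hmem with hm | hm
    · rw [hc m hm]
    · have : k ≤ m := h2 m hm
      have : m = k := le_antisymm hmk this
      rw [this]

lemma pv_minF_eq_first (p : String → Bool) (gs : List (List String)) (n : Int) :
    PySem.List.min? (pvF p gs n) (fun i => i) = pvFirst p gs n := by
  induction gs generalizing n with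
  | nil => simp [pvF, pvFirst, PySem.List.min?_eq_none_iff]
  | cons g t ih =>
    by_cases h : g.any p = true
    · have hne : g.filter p ≠ [] := by
        rw [Ne, List.filter_eq_nil_iff]
        rw [List.any_eq_true] at h
        rcases h with ⟨x, hx, hpx⟩
        exact fun hall => hall x hx hpx
      have hmapne : (g.filter p).map (fun _ => n) ≠ [] := by
        simpa using hne
      rw [pvFirst]
      simp only [h, if_true]
      rw [pvF]
      exact pv_min_split n _ _ hmapne
        (by intro x hx; simp only [List.mem_map] at hx; rcases hx with ⟨_, _, rfl⟩; rfl)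
        (by intro y hy; have := pvF_lower_bound p t (n + 1) y hy; omega)
    · rw [Bool.not_eq_true] at h
      have hnil : g.filter p = [] := by
        rw [List.filter_eq_nil_iff]
        rw [List.any_eq_false] at h
        exact fun x hx => h x hx
      rw [pvFirst]
      simp only [h, Bool.false_eq_true, if_false]
      rw [pvF, hnil]
      simpa using ih (n + 1)

-- one group's bucket of the filtered flat list
lemma pv_bucket (p : String → Bool) (ws : List String) (n : Int) :
    ((ws.map (fun w => (w, n))).filter (fun q => p q.1)).map Prod.snd
      = (ws.filter p).map (fun _ => n) := by
  induction ws with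
  | nil => rfl
  | cons w t ih => by_cases h : p w <;> simp [h, ih]

-- the filtered flat priority list, bucketed: hits = pvF
lemma pv_hits_eq (p : String → Bool) :
    ((pvPriority.filter (fun q => p q.1)).map Prod.snd)
      = pvF p (pvEraGroups.map Prod.fst) 0 := by
  have e : PySem.List.enumerate pvEraGroups 0 =
    [     ((0 : Int), (["scarlet", "violet", "paldea", "temporal"], "Scarlet & Violet (2023+)")),
     ((1 : Int), (["sword", "shield", "rebel", "darkness", "vivid", "evolving"], "Sword & Shield (2020-2022)")),
     ((2 : Int), (["sun", "moon", "guardians", "burning", "ultra", "forbidden"], "Sun & Moon (2017-2019)")),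
     ((3 : Int), (["xy", "flashfire", "phantom", "primal", "roaring", "ancient"], "XY (2014-2016)")),
     ((4 : Int), (["black", "white", "emerging", "noble", "next", "dark"], "Black & White (2011-2013)")),
     ((5 : Int), (["diamond", "pearl", "platinum", "heartgold", "soulsilver"], "Diamond & Pearl (2007-2011)")),
     ((6 : Int), (["ruby", "sapphire", "emerald", "firered", "leafgreen"], "EX Era (2003-2007)")),
     ((7 : Int), (["neo", "genesis", "discovery", "revelation", "destiny"], "Neo Era (2000-2001)")),
     ((8 : Int), (["base", "jungle", "fossil", "rocket", "gym"], "Classic (1998-2003)"))] := by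
    rfl
  rw [pvPriority, e]
  simp only [List.flatMap_cons, List.flatMap_nil, List.append_nil,
    List.filter_append, List.map_append]
  simp only [pv_bucket]
  simp only [pvEraGroups, List.map_cons, List.map_nil, pvF, List.append_nil]
  norm_num

theorem pv_main (s : String) : determine_era_py s = determine_era_py_alt s := by
  unfold determine_era_py determine_era_py_alt
  rw [pv_hits_eq (fun x => PySem.Str.isIn x (PySem.Str.lower s)), pv_minF_eq_first]
  simp only [pvEraGroups, List.map_cons, List.map_nil, pvFirst]
  split_ifs <;> rfl

-- ===== VERDICT (by name: the statement is the Claim_ definition above) =====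
theorem determine_era_py_spec : Claim_equal_determine_era_py := by
  intro s _
  unfold Spec_determine_era_py
  exact pv_main s
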